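-- pv_equiv track=rewrite | github.com/careercup/CtCI-6th-Edition-Python | chapter_08/p01_triple_step.py | triple_hop_recursive
-- ===== SOURCE A (Python) =====
-- def triple_hop_recursive(x, memo):
--     if x < 0:
--         return 0
--     memo[0] = 1
--     if x >= 1:
--         memo[1] = 1
--     if x >= 2:
--         memo[2] = memo[1] + memo[0]
--     if x > 2:
--         for i in range(3, x + 1):
--             memo[i] = memo[i - 1] + memo[i - 2] + memo[i - 3]
--     return memo[x]
-- ===== SOURCE B (Python) =====
-- def _mat_mul(A, B):
--     a, b, c, d, e, f, g, h, i = A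
--     j, k, l, m, n, o, p, q, r = B
--     return (a*j + b*m + c*p, a*k + b*n + c*q, a*l + b*o + c*r,
--             d*j + e*m + f*p, d*k + e*n + f*q, d*l + e*o + f*r,
--             g*j + h*m + i*p, g*k + h*n + i*q, g*l + h*o + i*r)
--
--
-- def triple_hop_recursive(x, memo):
--     # Matrix exponentiation of the tribonacci recurrence; O(log x) matrix
--     # multiplications instead of A's O(x) loop.  (Unlike A, does not write
--     # into memo; the equivalence is about the return value.)
--     if x < 0:
--         return 0
--     r = (1, 0, 0, 0, 1, 0, 0, 0, 1)
--     b = (1, 1, 1, 1, 0, 0, 0, 1, 0)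
--     e = x
--     while e > 0:
--         if e & 1:
--             r = _mat_mul(r, b)
--         b = _mat_mul(b, b)
--         e >>= 1
--     # r = M^x ; bottom row applied to (T(2), T(1), T(0)) = (2, 1, 1) gives T(x)
--     return r[6] * 2 + r[7] + r[8]
-- ===== Notes on version B (the rewrite author's own statement) =====
-- stated objective: faster
-- what changed: Replaces the linear memo-filling loop with 3x3 matrix exponentiation (square-and-multiply) of the tribonacci recurrence, reading off T(x) from the bottom row of M^x; B does not mutate memo.
import Mathlib
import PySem

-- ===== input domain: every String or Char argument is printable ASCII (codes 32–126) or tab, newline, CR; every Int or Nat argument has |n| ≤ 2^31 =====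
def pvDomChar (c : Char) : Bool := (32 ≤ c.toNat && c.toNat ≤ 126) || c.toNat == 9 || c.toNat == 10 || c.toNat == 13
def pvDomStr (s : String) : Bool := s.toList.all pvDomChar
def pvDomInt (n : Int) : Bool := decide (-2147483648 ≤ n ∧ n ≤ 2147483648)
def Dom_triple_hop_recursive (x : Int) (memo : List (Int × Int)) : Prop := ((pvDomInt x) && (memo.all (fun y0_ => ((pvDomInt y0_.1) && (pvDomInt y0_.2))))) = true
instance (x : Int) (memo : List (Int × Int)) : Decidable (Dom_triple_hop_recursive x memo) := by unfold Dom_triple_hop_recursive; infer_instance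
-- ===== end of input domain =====

-- B replaces A's linear memo-filling loop by 3x3 matrix exponentiation of the
-- tribonacci recurrence (O(log x) matrix multiplications); A mutates the memo
-- dict in place, B does not — the equivalence proved is about the return value.

-- ===== PORT A =====
-- Every dict read in A (memo[1], memo[0], memo[i-1], …) happens under a guard
-- that guarantees the key was written before, so getD with default 0 is exact.
def triple_hop_recursive (x : Int) (memo : List (Int × Int)) : Int :=
  if x < 0 then 0
  else
    let m1 := (PySem.Dict.mk memo).insert 0 1
    let m2 := if x ≥ 1 then m1.insert 1 1 else m1
    let m3 := if x ≥ 2 then m2.insert 2 (m2.getD 1 0 + m2.getD 0 0) else m2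
    let m4 := if x > 2 then
        (PySem.List.pyRange 3 (x + 1) 1).foldl
          (fun m i => m.insert i (m.getD (i - 1) 0 + m.getD (i - 2) 0 + m.getD (i - 3) 0)) m3
      else m3
    m4.getD x 0

-- ===== PORT B =====
structure PvMat where
  a : Int
  b : Int
  c : Int
  d : Int
  e : Int
  f : Int
  g : Int
  h : Int
  i : Int
deriving DecidableEq, Repr

def pvMatMul (A B : PvMat) : PvMat :=
  ⟨A.a*B.a + A.b*B.d + A.c*B.g, A.a*B.b + A.b*B.e + A.c*B.h, A.a*B.c + A.b*B.f + A.c*B.i,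
   A.d*B.a + A.e*B.d + A.f*B.g, A.d*B.b + A.e*B.e + A.f*B.h, A.d*B.c + A.e*B.f + A.f*B.i,
   A.g*B.a + A.h*B.d + A.i*B.g, A.g*B.b + A.h*B.e + A.i*B.h, A.g*B.c + A.h*B.f + A.i*B.i⟩

def pvI : PvMat := ⟨1,0,0, 0,1,0, 0,0,1⟩
def pvM : PvMat := ⟨1,1,1, 1,0,0, 0,1,0⟩

-- Source B's 'while e > 0' square-and-multiply loop; e is a nonnegative Python int,
-- so Nat with e % 2 / e / 2 is exact for 'e & 1' and 'e >>= 1'.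
def pvPowLoop (r b : PvMat) (e : Nat) : PvMat :=
  if e = 0 then r
  else pvPowLoop (if e % 2 = 1 then pvMatMul r b else r) (pvMatMul b b) (e / 2)
termination_by e
decreasing_by exact Nat.div_lt_self (by omega) (by omega)

def triple_hop_recursive_alt (x : Int) (memo : List (Int × Int)) : Int :=
  if x < 0 then 0
  else
    let r := pvPowLoop pvI pvM x.toNat
    r.g * 2 + r.h + r.i

-- ===== PRECONDITION & SPEC =====
def Spec_triple_hop_recursive (x : Int) (memo : List (Int × Int)) (out : Int) : Prop := out = triple_hop_recursive_alt x memo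
instance (x : Int) (memo : List (Int × Int)) (out : Int) : Decidable (Spec_triple_hop_recursive x memo out) := by unfold Spec_triple_hop_recursive; infer_instance

-- ===== CLAIM (what is proved, stated in full; the proofs are below) =====
def Claim_equal_triple_hop_recursive : Prop := ∀ (x : Int) (memo : List (Int × Int)), Dom_triple_hop_recursive x memo → Spec_triple_hop_recursive x memo (triple_hop_recursive x memo)

-- ===== LEMMAS AND PROOFS =====

-- reference tribonacci: T(0)=1, T(1)=1, T(2)=2, T(n+3)=T(n+2)+T(n+1)+T(n)
def pvTrib : Nat → Int
  | 0 => 1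
  | 1 => 1
  | 2 => 2
  | n + 3 => pvTrib (n + 2) + pvTrib (n + 1) + pvTrib n

lemma pvTrib_rec (n : Nat) (h : 2 ≤ n) :
    pvTrib (n + 1) = pvTrib n + pvTrib (n - 1) + pvTrib (n - 2) := by
  obtain ⟨m, rfl⟩ : ∃ m, n = m + 2 := ⟨n - 2, by omega⟩
  simp [pvTrib]

lemma pvMatMul_assoc (A B C : PvMat) :
    pvMatMul (pvMatMul A B) C = pvMatMul A (pvMatMul B C) := by
  simp only [pvMatMul, PvMat.mk.injEq]
  refine ⟨?_, ?_, ?_, ?_, ?_, ?_, ?_, ?_, ?_⟩ <;> ring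

lemma pvMatMul_I_right (A : PvMat) : pvMatMul A pvI = A := by
  simp [pvMatMul, pvI]

def pvPow (b : PvMat) : Nat → PvMat
  | 0 => pvI
  | n + 1 => pvMatMul (pvPow b n) b

lemma pvMatMul_I_left (A : PvMat) : pvMatMul pvI A = A := by
  simp [pvMatMul, pvI]

lemma pvPow_succ_left (b : PvMat) (n : Nat) :
    pvPow b (n + 1) = pvMatMul b (pvPow b n) := by
  induction n with
  | zero => simp [pvPow, pvMatMul_I_left, pvMatMul_I_right]
  | succ n ih =>
      show pvMatMul (pvPow b (n + 1)) b = pvMatMul b (pvMatMul (pvPow b n) b)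
      rw [ih, pvMatMul_assoc]

lemma pvPow_sq (b : PvMat) (k : Nat) :
    pvPow (pvMatMul b b) k = pvPow b (2 * k) := by
  induction k with
  | zero => rfl
  | succ k ih =>
      show pvMatMul (pvPow (pvMatMul b b) k) (pvMatMul b b) = _
      rw [ih]
      have : 2 * (k + 1) = (2 * k + 1) + 1 := by omega
      rw [this]
      show _ = pvMatMul (pvPow b (2 * k + 1)) b
      show _ = pvMatMul (pvMatMul (pvPow b (2 * k)) b) b
      rw [pvMatMul_assoc]

lemma pvPowLoop_eq (r b : PvMat) (e : Nat) :
    pvPowLoop r b e = pvMatMul r (pvPow b e) := by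
  induction r, b, e using pvPowLoop.induct with
  | case1 r b => simp [pvPowLoop, pvPow, pvMatMul_I_right]
  | case2 r b e hne ih =>
      rw [pvPowLoop]
      simp only [if_neg hne]
      by_cases hodd : e % 2 = 1
      · simp only [dif_pos hodd] at ih
        simp only [if_pos hodd]
        rw [ih, pvPow_sq, pvMatMul_assoc, ← pvPow_succ_left,
          show 2 * (e / 2) + 1 = e from by omega]
      · simp only [dif_neg hodd] at ih
        simp only [if_neg hodd]
        rw [ih, pvPow_sq, show 2 * (e / 2) = e from by omega]

-- matrix-vector action on (v0, v1, v2)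
def pvMV (A : PvMat) (v : Int × Int × Int) : Int × Int × Int :=
  (A.a * v.1 + A.b * v.2.1 + A.c * v.2.2,
   A.d * v.1 + A.e * v.2.1 + A.f * v.2.2,
   A.g * v.1 + A.h * v.2.1 + A.i * v.2.2)

lemma pvMV_mul (A B : PvMat) (v : Int × Int × Int) :
    pvMV (pvMatMul A B) v = pvMV A (pvMV B v) := by
  simp only [pvMV, pvMatMul, Prod.mk.injEq]
  refine ⟨?_, ?_, ?_⟩ <;> ring

lemma pvMV_pow (n : Nat) :
    pvMV (pvPow pvM n) (2, 1, 1) = (pvTrib (n + 2), pvTrib (n + 1), pvTrib n) := by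
  induction n with
  | zero => simp [pvPow, pvMV, pvI, pvTrib]
  | succ n ih =>
      rw [pvPow_succ_left, pvMV_mul, ih]
      simp only [pvMV, pvM, Prod.mk.injEq]
      refine ⟨?_, by ring, by ring⟩
      simp [pvTrib]

lemma alt_eq_trib (x : Int) (memo : List (Int × Int)) (hx : 0 ≤ x) :
    triple_hop_recursive_alt x memo = pvTrib x.toNat := by
  unfold triple_hop_recursive_alt
  rw [if_neg (by omega)]
  have h := pvMV_pow x.toNat
  have h' := congrArg (fun p => p.2.2) h
  simp only [pvMV] at h'
  simpa [pvPowLoop_eq, pvMatMul_I_left, mul_comm] using h'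

-- the dict after A's three initial writes (for x ≥ 2) holds trib at 0, 1, 2
lemma m3_getD (memo : List (Int × Int)) (j : Int) (hj : j = 0 ∨ j = 1 ∨ j = 2) :
    ((((PySem.Dict.mk memo).insert 0 1).insert 1 1).insert 2
        ((((PySem.Dict.mk memo).insert 0 1).insert 1 1).getD 1 0 +
         (((PySem.Dict.mk memo).insert 0 1).insert 1 1).getD 0 0)).getD j 0
      = pvTrib j.toNat := by
  rcases hj with rfl | rfl | rfl <;>
    simp [PySem.Dict.getD_insert, pvTrib]

-- A's fill loop keeps trib at the last three indices
lemma fold_inv (d : PySem.Dict Int Int)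
    (h0 : d.getD 0 0 = pvTrib 0) (h1 : d.getD 1 0 = pvTrib 1) (h2 : d.getD 2 0 = pvTrib 2)
    (n : Nat) (hn : 2 ≤ n) :
    let dn := (PySem.List.pyRange 3 ((n : Int) + 1) 1).foldl
        (fun m i => m.insert i (m.getD (i - 1) 0 + m.getD (i - 2) 0 + m.getD (i - 3) 0)) d
    dn.getD (n : Int) 0 = pvTrib n ∧ dn.getD ((n : Int) - 1) 0 = pvTrib (n - 1) ∧
      dn.getD ((n : Int) - 2) 0 = pvTrib (n - 2) := by
  induction n with
  | zero => omega
  | succ n ih =>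
      rcases Nat.lt_or_ge n 2 with hlt | hge
      · -- n + 1 = 2: the range 3..3 is empty
        have hn2 : n = 1 := by omega
        subst hn2
        rw [PySem.List.pyRange_one_eq_nil (by norm_num)]
        simpa using ⟨h2, h1, h0⟩
      · obtain ⟨e1, e2, e3⟩ := ih hge
        have hsplit : PySem.List.pyRange 3 ((↑(n + 1) : Int) + 1) 1
            = PySem.List.pyRange 3 ((n : Int) + 1) 1 ++ [((n : Int) + 1)] := by
          have := PySem.List.pyRange_one_succ_right (a := 3) (b := (n : Int) + 1)
            (by push_cast; omega)
          push_cast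
          push_cast at this
          convert this using 2 <;> ring
        simp only [hsplit, List.foldl_append, List.foldl_cons, List.foldl_nil]
        set dn := (PySem.List.pyRange 3 ((n : Int) + 1) 1).foldl
            (fun m i => m.insert i (m.getD (i - 1) 0 + m.getD (i - 2) 0 + m.getD (i - 3) 0)) d
          with hdn
        have r1 : (n : Int) + 1 - 1 = (n : Int) := by ring
        have r2 : (n : Int) + 1 - 2 = (n : Int) - 1 := by ring
        have r3 : (n : Int) + 1 - 3 = (n : Int) - 2 := by ring
        refine ⟨?_, ?_, ?_⟩
        · push_cast
          rw [PySem.Dict.getD_insert, if_pos rfl, r1, r2, r3, e1, e2, e3,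
            pvTrib_rec n hge]
        · push_cast
          rw [PySem.Dict.getD_insert, if_neg (by omega), r1, e1]
        · push_cast
          rw [PySem.Dict.getD_insert, if_neg (by omega), r2, e2]

lemma a_eq_trib (x : Int) (memo : List (Int × Int)) (hx : 0 ≤ x) :
    triple_hop_recursive x memo = pvTrib x.toNat := by
  unfold triple_hop_recursive
  rw [if_neg (by omega)]
  rcases show x = 0 ∨ x = 1 ∨ 2 ≤ x by omega with rfl | rfl | hge2
  · norm_num
    simp [PySem.Dict.getD_insert, pvTrib]
  · norm_num
    simp [PySem.Dict.getD_insert, pvTrib]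
  · have hge1 : x ≥ 1 := by omega
    simp only [ge_iff_le, if_pos hge1, if_pos hge2]
    set m3 := (((PySem.Dict.mk memo).insert 0 1).insert 1 1).insert 2
        ((((PySem.Dict.mk memo).insert 0 1).insert 1 1).getD 1 0 +
         (((PySem.Dict.mk memo).insert 0 1).insert 1 1).getD 0 0) with hm3
    have hm4 : (if x > 2 then
          (PySem.List.pyRange 3 (x + 1) 1).foldl
            (fun m i => m.insert i (m.getD (i - 1) 0 + m.getD (i - 2) 0 + m.getD (i - 3) 0)) m3
        else m3)
        = (PySem.List.pyRange 3 (x + 1) 1).foldl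
            (fun m i => m.insert i (m.getD (i - 1) 0 + m.getD (i - 2) 0 + m.getD (i - 3) 0)) m3 := by
      by_cases h3 : x > 2
      · rw [if_pos h3]
      · have hx2 : x = 2 := by omega
        subst hx2
        rw [if_neg h3, PySem.List.pyRange_one_eq_nil (by norm_num), List.foldl_nil]
    rw [hm4]
    have hnat : ((x.toNat : Int)) = x := Int.toNat_of_nonneg hx
    have hinv := fold_inv m3
      (by rw [hm3]; exact m3_getD memo 0 (by norm_num))
      (by rw [hm3]; exact m3_getD memo 1 (by norm_num))
      (by rw [hm3]; exact m3_getD memo 2 (by norm_num))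
      x.toNat (by omega)
    rw [hnat] at hinv
    exact hinv.1

-- ===== VERDICT (by name: the statement is the Claim_ definition above) =====
theorem triple_hop_recursive_spec : Claim_equal_triple_hop_recursive := by
  intro x memo _
  unfold Spec_triple_hop_recursive
  by_cases hx : 0 ≤ x
  · rw [a_eq_trib x memo hx, alt_eq_trib x memo hx]
  · unfold triple_hop_recursive triple_hop_recursive_alt
    rw [if_pos (by omega), if_pos (by omega)]
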